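-- pv_equiv track=rewrite | github.com/KingSK1998/Python-Programs | CheckParityInArray.py | FillArrayWithLengths
-- ===== SOURCE A (Python) =====
-- def FillArrayWithLengths(message):
--     arr = []
--     x = message.split()
--     if len(x) <= 25:
--         for i in range(0, len(x), 5):
--             temp = []
--             for j in range(i, i+5):
--                 if j < len(x):
--                     temp.append(len(x[j]))
--                 else:
--                     temp.append(0)
--             arr.append(temp)
--     return arr
-- ===== SOURCE B (Python) =====
-- def FillArrayWithLengths(message):
--     x = message.split()
--     if len(x) > 25:
--         return []
--     lengths = [len(w) for w in x]
--     pad = (-len(lengths)) % 5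
--     padded = lengths + [0] * pad
--     return [padded[i:i+5] for i in range(0, len(padded), 5)]
-- ===== Notes on version B (the rewrite author's own statement) =====
-- stated objective: simpler
-- what changed: B replaces A's nested index loops with per-cell bounds checks by a three-step decomposition: map the words to their lengths, pad that list with zeros up to the next multiple of 5, then chunk it into rows of five with slices.
import Mathlib
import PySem

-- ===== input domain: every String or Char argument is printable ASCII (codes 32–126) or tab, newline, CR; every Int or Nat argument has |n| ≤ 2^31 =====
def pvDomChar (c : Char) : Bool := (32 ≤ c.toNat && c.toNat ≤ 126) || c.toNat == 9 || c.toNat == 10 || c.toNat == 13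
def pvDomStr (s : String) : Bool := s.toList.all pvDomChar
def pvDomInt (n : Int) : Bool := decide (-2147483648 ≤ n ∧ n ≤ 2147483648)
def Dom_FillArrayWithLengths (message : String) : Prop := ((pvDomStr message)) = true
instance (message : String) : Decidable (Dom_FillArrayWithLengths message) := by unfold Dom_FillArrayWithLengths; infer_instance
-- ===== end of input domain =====

-- B replaces A's bounds-checked double index loop by "compute lengths, pad to a multiple of 5, chunk with slices" (simpler decomposition, same cost).

-- ===== PORT A =====
def FillArrayWithLengths (message : String) : List (List Int) :=
  let x := PySem.Str.split₀ message
  if (x.length : Int) ≤ 25 then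
    (PySem.List.pyRange 0 (x.length : Int) 5).foldl (fun arr i =>
      arr ++ [ (PySem.List.pyRange i (i+5) 1).foldl (fun temp j =>
          if j < (x.length : Int) then temp ++ [PySem.Str.len (PySem.List.pyGetD x j "")]
          else temp ++ [0]) [] ]) []
  else []

-- ===== PORT B =====
def FillArrayWithLengths_alt (message : String) : List (List Int) :=
  let x := PySem.Str.split₀ message
  if 25 < (x.length : Int) then []
  else
    let lengths := x.map PySem.Str.len
    let pad := PySem.Int.mod (-(lengths.length : Int)) 5
    let padded := lengths ++ List.replicate pad.toNat 0
    (PySem.List.pyRange 0 (padded.length : Int) 5).map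
      (fun i => PySem.List.slice padded (some i) (some (i+5)))

-- ===== PRECONDITION & SPEC =====
def Spec_FillArrayWithLengths (message : String) (out : List (List Int)) : Prop := out = FillArrayWithLengths_alt message
instance (message : String) (out : List (List Int)) : Decidable (Spec_FillArrayWithLengths message out) := by unfold Spec_FillArrayWithLengths; infer_instance

-- ===== CLAIM (what is proved, stated in full; the proofs are below) =====
def Claim_equal_FillArrayWithLengths : Prop := ∀ (message : String), Dom_FillArrayWithLengths message → Spec_FillArrayWithLengths message (FillArrayWithLengths message)

-- ===== LEMMAS AND PROOFS =====

-- range(a, a+5) is the five consecutive integers from a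
lemma range5 (a : Int) : PySem.List.pyRange a (a+5) 1 = [a, a+1, a+2, a+3, a+4] := by
  rw [PySem.List.pyRange_one_cons (by omega), PySem.List.pyRange_one_cons (by omega),
      PySem.List.pyRange_one_cons (by omega), PySem.List.pyRange_one_cons (by omega),
      PySem.List.pyRange_one_cons (by omega), PySem.List.pyRange_one_eq_nil (by omega)]
  ring_nf

-- a five-element in-bounds window, element by element
lemma take5 (xs : List Int) (j : Nat) (h : j + 5 ≤ xs.length) :
    (xs.drop j).take 5 =
      [xs.getD j 0, xs.getD (j+1) 0, xs.getD (j+2) 0, xs.getD (j+3) 0, xs.getD (j+4) 0] := by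
  apply List.ext_getElem
  · simp; omega
  · intro t ht1 ht2
    simp only [List.getElem_take, List.getElem_drop]
    have hlt : t < 5 := by simpa using ht2
    interval_cases t <;> simp <;> rw [List.getElem?_eq_getElem (by omega)] <;> rfl

-- A's inner bounds-checked fold is a map over the same range
lemma innerfold (x : List String) (i : Int) :
    (PySem.List.pyRange i (i+5) 1).foldl (fun temp j =>
        if j < (x.length : Int) then temp ++ [PySem.Str.len (PySem.List.pyGetD x j "")]
        else temp ++ [0]) [] =
    (PySem.List.pyRange i (i+5) 1).map (fun j =>
        if j < (x.length : Int) then PySem.Str.len (PySem.List.pyGetD x j "") else 0) := by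
  have : (fun (temp : List Int) (j : Int) =>
        if j < (x.length : Int) then temp ++ [PySem.Str.len (PySem.List.pyGetD x j "")]
        else temp ++ [0]) = (fun temp j => temp ++
        [if j < (x.length : Int) then PySem.Str.len (PySem.List.pyGetD x j "") else 0]) := by
    funext temp j; split_ifs <;> rfl
  rw [this, PySem.List.foldl_append_singleton_eq_map]
  simp

-- A's bounds-checked entry at index jn is B's padded list's entry there
lemma elt (x : List String) (p jn : Nat) (hj : jn < x.length + p) :
    (if (jn:Int) < (x.length:Int) then PySem.Str.len (PySem.List.pyGetD x (jn:Int) "") else 0)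
      = (x.map PySem.Str.len ++ List.replicate p 0).getD jn 0 := by
  by_cases h : jn < x.length
  · rw [if_pos (by exact_mod_cast h), PySem.List.pyGetD_natCast]
    rw [List.getD_eq_getElem _ _ h, List.getD_eq_getElem _ _ (by simp; omega)]
    rw [List.getElem_append_left (by simpa using h)]
    simp
  · rw [if_neg (by omega)]
    rw [List.getD_eq_getElem _ _ (by simpa using hj)]
    rw [List.getElem_append_right (by simpa using h)]
    simp

-- ===== VERDICT (by name: the statement is the Claim_ definition above) =====
theorem FillArrayWithLengths_spec : Claim_equal_FillArrayWithLengths := by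
  intro msg _
  unfold Spec_FillArrayWithLengths FillArrayWithLengths FillArrayWithLengths_alt
  set x := PySem.Str.split₀ msg with hx
  by_cases hb : (x.length : Int) ≤ 25
  · rw [if_pos hb, if_neg (by omega)]
    simp only
    rw [PySem.List.foldl_append_singleton_eq_map, List.nil_append]
    have hL : ((x.map PySem.Str.len).length : Int) = (x.length : Int) := by simp
    rw [hL]
    set n : Nat := x.length with hn
    have hmod : PySem.Int.mod (-(n:Int)) 5 = (-(n:Int)) % 5 :=
      PySem.Int.mod_eq_emod_of_pos (by norm_num)
    rw [hmod]
    set p : Nat := ((-(n:Int)) % 5).toNat with hp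
    have hpn : ((-(n:Int)) % 5) = (p:Int) := by omega
    have hplt : p < 5 ∧ (((n:Int) + p) % 5 = 0) := by omega
    have hlen : ((x.map PySem.Str.len) ++ List.replicate p 0).length = n + p := by simp [← hn]
    rw [hlen]
    set m : Nat := n + p with hm
    obtain ⟨c, hc⟩ : ∃ c : Nat, m = 5 * c := ⟨m / 5, by omega⟩
    rw [PySem.List.pyRange_of_pos 0 (n:Int) (by norm_num),
        PySem.List.pyRange_of_pos 0 (m:Int) (by norm_num)]
    have hcnt : (if (0:Int) < (n:Int) then (((n:Int) - 0 + 5 - 1)/5).toNat else 0) = c ∧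
        (if (0:Int) < (m:Int) then (((m:Int) - 0 + 5 - 1)/5).toNat else 0) = c := by
      constructor <;> split_ifs <;> omega
    rw [hcnt.1, hcnt.2, List.map_map, List.map_map]
    apply List.map_congr_left
    intro k hk
    have hk5 : 5 * k + 5 ≤ m := by
      simp only [List.mem_range] at hk; omega
    simp only [Function.comp_apply]
    rw [innerfold, range5]
    have ha : (0:Int) + 5 * (k:Int) = ((5*k : Nat) : Int) := by push_cast; ring
    rw [ha]
    rw [show (((5*k : Nat) : Int) + 5) = (((5*k+5 : Nat)) : Int) by push_cast; ring]
    rw [PySem.List.slice_natCast]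
    rw [show (5*k+5) - 5*k = 5 from by omega]
    rw [take5 _ _ (by rw [hlen]; omega)]
    simp only [List.map_cons, List.map_nil]
    congr 1 <;> [skip; congr 1] <;> [skip; skip; congr 1] <;> [skip; skip; skip; congr 1]
      <;> [skip; skip; skip; skip; congr 1]
    · exact elt x p (5*k) (by omega)
    · rw [show ((5*k:Nat):Int) + 1 = ((5*k+1 : Nat):Int) by push_cast; ring]
      exact elt x p (5*k+1) (by omega)
    · rw [show ((5*k:Nat):Int) + 2 = ((5*k+2 : Nat):Int) by push_cast; ring]
      exact elt x p (5*k+2) (by omega)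
    · rw [show ((5*k:Nat):Int) + 3 = ((5*k+3 : Nat):Int) by push_cast; ring]
      exact elt x p (5*k+3) (by omega)
    · rw [show ((5*k:Nat):Int) + 4 = ((5*k+4 : Nat):Int) by push_cast; ring]
      exact elt x p (5*k+4) (by omega)
  · rw [if_neg hb, if_pos (by omega)]
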